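-- pv_equiv track=rewrite | github.com/pancake423/advent-of-code | 2024/day_21/solution.py | sane_split
-- ===== SOURCE A (Python) =====
-- def sane_split(string, char):
--     out = []
--     prev = 0
--     for i in range(len(string)):
--         if string[i] == char:
--             out.append(string[prev:i+1])
--             prev = i+1
--     return out
-- ===== SOURCE B (Python) =====
-- def sane_split(string, char):
--     out = []
--     buf = []
--     for c in string:
--         buf.append(c)
--         if c == char:
--             out.append(''.join(buf))
--             buf = []
--     return out
-- ===== Notes on version B (the rewrite author's own statement) =====
-- stated objective: alternative
-- what changed: A keeps an integer prev pointer and slices the string by indices at each match; B keeps no indices at all, accumulating characters into a chunk buffer and flushing the buffer on each match.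
import Mathlib
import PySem

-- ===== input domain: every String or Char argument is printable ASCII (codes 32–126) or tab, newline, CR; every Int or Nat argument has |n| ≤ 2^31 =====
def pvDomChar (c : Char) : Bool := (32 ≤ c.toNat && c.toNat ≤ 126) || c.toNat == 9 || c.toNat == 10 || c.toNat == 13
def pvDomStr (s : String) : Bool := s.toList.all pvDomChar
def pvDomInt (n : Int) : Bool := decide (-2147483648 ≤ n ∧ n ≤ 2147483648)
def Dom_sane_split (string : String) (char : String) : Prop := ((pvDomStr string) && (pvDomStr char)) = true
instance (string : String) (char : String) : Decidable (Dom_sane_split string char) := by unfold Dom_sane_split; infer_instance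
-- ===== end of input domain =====

-- B replaces A's index-pointer-and-slice scan by an index-free chunk buffer that is flushed at each match (alternative decomposition, same cost).

-- ===== PORT A =====
-- A: scan over indices; string[i] is the 1-character string, compared with char (so a multi-char char never matches); slices string[prev:i+1].
def sane_split (string : String) (char : String) : List String :=
  ((PySem.List.pyRange 0 (string.toList.length : Int) 1).foldl
    (fun (st : List String × Int) i =>
      if (PySem.List.pyGet? string.toList i).map (fun c => [c]) = some char.toList then
        (st.1 ++ [String.ofList (PySem.List.slice string.toList (some st.2) (some (i + 1)))], i + 1)
      else st)
    ([], 0)).1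

-- ===== PORT B =====
-- B: no indices or slices; characters accumulate in a buffer, which is emitted and reset at each match.
def sane_split_alt (string : String) (char : String) : List String :=
  (string.toList.foldl
    (fun (st : List String × List Char) c =>
      if [c] = char.toList then (st.1 ++ [String.ofList (st.2 ++ [c])], [])
      else (st.1, st.2 ++ [c]))
    ([], [])).1

-- ===== PRECONDITION & SPEC =====
def Spec_sane_split (string : String) (char : String) (out : List String) : Prop := out = sane_split_alt string char
instance (string : String) (char : String) (out : List String) : Decidable (Spec_sane_split string char out) := by unfold Spec_sane_split; infer_instance

-- ===== CLAIM (what is proved, stated in full; the proofs are below) =====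
def Claim_equal_sane_split : Prop := ∀ (string : String) (char : String), Dom_sane_split string char → Spec_sane_split string char (sane_split string char)

-- ===== LEMMAS AND PROOFS =====

-- Invariant relating A's (out, prev-index) state after n steps to B's (out, buffer) state:
-- same output so far, prev is a Nat ≤ n, and B's buffer is exactly the slice cs[prev:n].
theorem sane_split_invariant (cs t : List Char) (n : Nat) (hn : n ≤ cs.length) :
    ∃ p : Nat, p ≤ n ∧
      ((PySem.List.pyRange 0 (n : Int) 1).foldl
        (fun (st : List String × Int) i =>
          if (PySem.List.pyGet? cs i).map (fun c => [c]) = some t then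
            (st.1 ++ [String.ofList (PySem.List.slice cs (some st.2) (some (i + 1)))], i + 1)
          else st)
        ([], 0)) = (((cs.take n).foldl
        (fun (st : List String × List Char) c =>
          if [c] = t then (st.1 ++ [String.ofList (st.2 ++ [c])], [])
          else (st.1, st.2 ++ [c]))
        ([], [])).1, (p : Int)) ∧
      ((cs.take n).foldl
        (fun (st : List String × List Char) c =>
          if [c] = t then (st.1 ++ [String.ofList (st.2 ++ [c])], [])
          else (st.1, st.2 ++ [c]))
        ([], [])).2 = (cs.drop p).take (n - p) := by
  induction n with
  | zero =>
      exact ⟨0, le_rfl, by simp, by simp⟩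
  | succ n ih =>
      obtain ⟨p, hp, hA, hB⟩ := ih (Nat.le_of_succ_le hn)
      have hlt : n < cs.length := hn
      have hcast : ((n : Int) + 1) = ((n + 1 : Nat) : Int) := by push_cast; ring
      have hrange : PySem.List.pyRange 0 ((n + 1 : Nat) : Int) 1
          = PySem.List.pyRange 0 (n : Int) 1 ++ [(n : Int)] := by
        rw [PySem.List.pyRange_one, PySem.List.pyRange_one]
        simp [List.range_succ]
      have htake : cs.take (n + 1) = cs.take n ++ [cs[n]] := by
        rw [List.take_add_one]
        simp [List.getElem?_eq_getElem hlt]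
      have hget : PySem.List.pyGet? cs (n : Int) = some cs[n] := by
        rw [PySem.List.pyGet?_eq_some_getElem cs (by positivity) (by exact_mod_cast hlt)]
        simp
      -- the buffer extended by cs[n] is the slice cs[p:n+1]
      have hbuf : (cs.drop p).take (n - p) ++ [cs[n]] = (cs.drop p).take (n + 1 - p) := by
        have hdl : n - p < (cs.drop p).length := by simp [List.length_drop]; omega
        have : (cs.drop p)[n - p] = cs[n] := by
          rw [List.getElem_drop]
          congr 1
          omega
        rw [show n + 1 - p = (n - p) + 1 by omega, List.take_add_one,
          List.getElem?_eq_getElem hdl, this]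
        simp
      have hslice : PySem.List.slice cs (some (p : Int)) (some ((n : Int) + 1))
          = (cs.drop p).take (n + 1 - p) := by
        rw [hcast, PySem.List.slice_natCast]
      rw [hrange, htake, List.foldl_append, List.foldl_append, hA]
      simp only [List.foldl_cons, List.foldl_nil, hget, Option.map_some]
      by_cases hc : [cs[n]] = t
      · refine ⟨n + 1, le_rfl, ?_, ?_⟩
        · rw [if_pos (show (some [cs[n]] = some t) from by rw [hc]), if_pos hc,
            hslice, hB, hbuf, hcast]
        · rw [if_pos hc]
          simp
      · refine ⟨p, by omega, ?_, ?_⟩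
        · rw [if_neg (show ¬ (some [cs[n]] = some t) from by simpa using hc), if_neg hc]
        · rw [if_neg hc, hB, hbuf]

-- ===== VERDICT (by name: the statement is the Claim_ definition above) =====
theorem sane_split_spec : Claim_equal_sane_split := by
  intro string char _
  unfold Spec_sane_split sane_split sane_split_alt
  obtain ⟨p, _, hA, _⟩ := sane_split_invariant string.toList char.toList string.toList.length le_rfl
  rw [hA, List.take_length]
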